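-- pv_equiv track=rewrite | github.com/juanjoseexpositogonzalez/aoc25 | day09/main.py | get_interior
-- ===== SOURCE A (Python) =====
-- from typing import Final, List, Self, Tuple, Set
--
-- def flood_fill_exterior(border: Set[Tuple[int, int]],
--                          bounds: Tuple[int, int, int, int]) -> Set[Tuple[int, int]]:
--     """
--     Flood fill desde las esquinas para encontrar todas las baldosas EXTERIORES.
--
--     Estrategia:
--     1. Empezamos desde una esquina (que sabemos está fuera)
--     2. Expandimos a todos los vecinos que no sean borde
--     3. Todo lo que NO alcanzamos está dentro del polígono
--     """
--     min_x, max_x, min_y, max_y = bounds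
--
--     # BFS desde la esquina superior izquierda
--     exterior: Set[Tuple[int, int]] = set()
--     queue = [(min_x, min_y)]
--
--     while queue:
--         x, y = queue.pop()
--
--         # Fuera de límites
--         if x < min_x or x > max_x or y < min_y or y > max_y:
--             continue
--
--         # Ya visitado o es borde
--         if (x, y) in exterior or (x, y) in border:
--             continue
--
--         exterior.add((x, y))
--
--         # Expandir a vecinos (4 direcciones)
--         queue.append((x + 1, y))
--         queue.append((x - 1, y))
--         queue.append((x, y + 1))
--         queue.append((x, y - 1))
--
--     return exterior
--
-- def get_interior(border: Set[Tuple[int, int]],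
--                  bounds: Tuple[int, int, int, int]) -> Set[Tuple[int, int]]:
--     """
--     Encuentra todas las baldosas INTERIORES del polígono.
--
--     Interior = Todo lo que está dentro de bounds - borde - exterior
--     """
--     min_x, max_x, min_y, max_y = bounds
--     exterior = flood_fill_exterior(border, bounds)
--
--     interior: Set[Tuple[int, int]] = set()
--     for x in range(min_x, max_x + 1):
--         for y in range(min_y, max_y + 1):
--             if (x, y) not in border and (x, y) not in exterior:
--                 interior.add((x, y))
--
--     return interior
-- ===== SOURCE B (Python) =====
-- from typing import Tuple, Set
--
--
-- def get_interior(border: Set[Tuple[int, int]],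
--                  bounds: Tuple[int, int, int, int]) -> Set[Tuple[int, int]]:
--     """Round-based label propagation instead of a DFS stack: seed the corner,
--     then repeatedly sweep the free cells, absorbing any cell orthogonally
--     adjacent to an already-marked exterior cell, until a sweep changes nothing.
--     Interior = free cells never marked."""
--     min_x, max_x, min_y, max_y = bounds
--     free = [(x, y)
--             for x in range(min_x, max_x + 1)
--             for y in range(min_y, max_y + 1)
--             if (x, y) not in border]
--     ext: Set[Tuple[int, int]] = set()
--     if (min_x, min_y) in free:
--         ext.add((min_x, min_y))
--         changed = True
--         while changed:
--             changed = False
--             for (x, y) in free: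
--                 if (x, y) not in ext and ((x + 1, y) in ext or (x - 1, y) in ext
--                                           or (x, y + 1) in ext or (x, y - 1) in ext):
--                     ext.add((x, y))
--                     changed = True
--     return {c for c in free if c not in ext}
-- ===== Notes on version B (the rewrite author's own statement) =====
-- stated objective: alternative
-- what changed: Replaces A's LIFO-stack flood fill from the corner by round-based label propagation: seed the corner cell, then repeatedly sweep the list of free bounding-box cells absorbing any cell orthogonally adjacent to an already-marked exterior cell until a sweep changes nothing; interior = free cells never marked.
import Mathlib
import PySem

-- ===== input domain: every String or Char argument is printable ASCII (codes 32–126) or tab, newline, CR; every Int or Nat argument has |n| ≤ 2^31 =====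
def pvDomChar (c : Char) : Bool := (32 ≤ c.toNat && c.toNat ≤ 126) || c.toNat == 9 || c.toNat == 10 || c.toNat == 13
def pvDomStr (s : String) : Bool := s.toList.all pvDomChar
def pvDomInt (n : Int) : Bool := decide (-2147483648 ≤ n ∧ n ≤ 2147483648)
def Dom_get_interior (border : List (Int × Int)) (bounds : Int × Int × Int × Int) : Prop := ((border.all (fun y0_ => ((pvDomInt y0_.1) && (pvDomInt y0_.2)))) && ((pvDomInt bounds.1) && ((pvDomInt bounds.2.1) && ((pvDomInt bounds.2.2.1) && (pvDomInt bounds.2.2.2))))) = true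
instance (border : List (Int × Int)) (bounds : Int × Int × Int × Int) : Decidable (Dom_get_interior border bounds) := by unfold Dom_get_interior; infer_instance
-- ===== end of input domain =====

-- B replaces A's LIFO-stack flood fill by round-based label propagation (sweep the free
-- cells absorbing neighbours of marked cells until a sweep changes nothing); objective:
-- alternative algorithm, same exact result.  Python's sets are ported as Std.HashSet
-- (Python sets are hash sets; only membership/insertion is used on them).

-- the cells of the bounding box, in scan order (used by both ports and by the
-- termination measure of the flood-fill loop)
def bboxCells (minx maxx miny maxy : Int) : List (Int × Int) :=
  (PySem.List.pyRange minx (maxx + 1)).flatMap (fun x =>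
    (PySem.List.pyRange miny (maxy + 1)).map (fun y => (x, y)))

-- termination helper for both ports' loops: adding a fresh element shrinks the complement
theorem pv_length_filter_lt {α : Type} (l : List α) (p q : α → Bool)
    (himp : ∀ a, q a = true → p a = true) (c : α) (hc : c ∈ l) (hp : p c = true)
    (hq : q c = false) : (l.filter q).length < (l.filter p).length := by
  induction l with
  | nil => cases hc
  | cons a t ih =>
    have hmono : (t.filter q).length ≤ (t.filter p).length :=
      (List.monotone_filter_right t himp).length_le
    rcases List.mem_cons.mp hc with h | h
    · subst h
      simp only [List.filter, hp, hq]
      simpa using Nat.lt_succ_of_le hmono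
    · rcases hqa : q a with _ | _ <;> rcases hpa : p a with _ | _ <;>
        simp only [List.filter, hqa, hpa, List.length_cons] <;>
        first
        | exact ih h
        | exact Nat.lt_succ_of_lt (ih h)
        | exact Nat.succ_lt_succ (ih h)
        | exact absurd (himp a hqa) (by simp [hpa])

-- ===== PORT A =====
-- Python's LIFO queue is kept top-first: queue.pop() is the head, queue.append pushes
-- in front (appends reversed, so pop order is Python's); only membership of the
-- resulting exterior set is ever used.
def floodLoop (border : List (Int × Int)) (minx maxx miny maxy : Int) :
    Std.HashSet (Int × Int) → List (Int × Int) → Std.HashSet (Int × Int)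
  | exterior, [] => exterior
  | exterior, (x, y) :: rest =>
    if x < minx ∨ x > maxx ∨ y < miny ∨ y > maxy then
      floodLoop border minx maxx miny maxy exterior rest
    else if exterior.contains (x, y) ∨ (x, y) ∈ border then
      floodLoop border minx maxx miny maxy exterior rest
    else
      floodLoop border minx maxx miny maxy (exterior.insert (x, y))
        ((x, y - 1) :: (x, y + 1) :: (x - 1, y) :: (x + 1, y) :: rest)
termination_by exterior queue =>
  5 * ((bboxCells minx maxx miny maxy).filter (fun c => !exterior.contains c)).length
    + queue.length
decreasing_by
  · simp only [List.length_cons]; omega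
  · simp only [List.length_cons]; omega
  · have hlt := pv_length_filter_lt (bboxCells minx maxx miny maxy)
      (fun c => !exterior.contains c) (fun c => !(exterior.insert (x, y)).contains c)
      (by intro a ha
          simp only [Std.HashSet.contains_insert, Bool.not_eq_true', Bool.or_eq_false_iff] at ha
          simp [ha.2])
      (x, y)
      (by simp only [bboxCells, List.mem_flatMap, List.mem_map]
          exact ⟨x, by rw [PySem.List.mem_pyRange_one]; omega,
                 ⟨y, by rw [PySem.List.mem_pyRange_one]; omega, rfl⟩⟩)
      (by rename_i hg2
          simp only [Bool.not_eq_true']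
          rw [Bool.eq_false_iff]
          exact fun hcon => hg2 (Or.inl hcon))
      (by simp [Std.HashSet.contains_insert])
    simp only [List.length_cons]
    omega

def flood_fill_exterior (border : List (Int × Int)) (bounds : Int × Int × Int × Int) :
    Std.HashSet (Int × Int) :=
  match bounds with
  | (minx, maxx, miny, maxy) =>
    floodLoop border minx maxx miny maxy ∅ [(minx, miny)]

def get_interior (border : List (Int × Int)) (bounds : Int × Int × Int × Int) :
    List (Int × Int) :=
  match bounds with
  | (minx, maxx, miny, maxy) =>
    let exterior := flood_fill_exterior border (minx, maxx, miny, maxy)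
    (PySem.List.pyRange minx (maxx + 1)).foldl (fun acc x =>
      (PySem.List.pyRange miny (maxy + 1)).foldl (fun acc y =>
        if (x, y) ∉ border ∧ ¬exterior.contains (x, y) then PySem.Set.add acc (x, y)
        else acc) acc)
      (PySem.Set.ofList [])

-- ===== PORT B =====
-- one sweep of Python's inner `for` loop: absorb every free cell adjacent to ext
def sweep : List (Int × Int) → Std.HashSet (Int × Int) → Bool →
    Std.HashSet (Int × Int) × Bool
  | [], ext, changed => (ext, changed)
  | (x, y) :: rest, ext, changed =>
    if ¬ext.contains (x, y) ∧ (ext.contains (x + 1, y) ∨ ext.contains (x - 1, y) ∨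
        ext.contains (x, y + 1) ∨ ext.contains (x, y - 1)) then
      sweep rest (ext.insert (x, y)) true
    else
      sweep rest ext changed

-- sweep only grows the set (cited by satLoop's termination and by the proofs)
theorem sweep_subset (free : List (Int × Int)) (ext : Std.HashSet (Int × Int)) (ch : Bool)
    (c : Int × Int) (hc : ext.contains c = true) : (sweep free ext ch).1.contains c = true := by
  induction free generalizing ext ch with
  | nil => exact hc
  | cons hd tl ih =>
    obtain ⟨x, y⟩ := hd
    rw [sweep]
    split
    · exact ih _ _ (by simp [Std.HashSet.contains_insert, hc])
    · exact ih _ _ hc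

-- a sweep that reports a change really added a free cell (termination of satLoop)
theorem sweep_changed (free : List (Int × Int)) (ext : Std.HashSet (Int × Int))
    (h : (sweep free ext false).2 = true) :
    ∃ c ∈ free, ext.contains c = false ∧ (sweep free ext false).1.contains c = true := by
  induction free generalizing ext with
  | nil => simp [sweep] at h
  | cons hd tl ih =>
    obtain ⟨x, y⟩ := hd
    rw [sweep] at h ⊢
    by_cases hcond : ¬ext.contains (x, y) ∧ (ext.contains (x + 1, y) ∨ ext.contains (x - 1, y) ∨
        ext.contains (x, y + 1) ∨ ext.contains (x, y - 1))
    · rw [if_pos hcond]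
      exact ⟨(x, y), List.mem_cons_self, Bool.not_eq_true _ ▸ hcond.1,
        sweep_subset tl _ true (x, y) (by simp [Std.HashSet.contains_insert])⟩
    · rw [if_neg hcond]
      rw [if_neg hcond] at h
      obtain ⟨c, hcf, hcn, hci⟩ := ih _ h
      exact ⟨c, List.mem_cons_of_mem _ hcf, hcn, hci⟩

-- Python's `while changed:` loop
def satLoop (free : List (Int × Int)) (ext : Std.HashSet (Int × Int)) :
    Std.HashSet (Int × Int) :=
  if h : (sweep free ext false).2 = true then satLoop free (sweep free ext false).1 else ext
termination_by (free.filter (fun c => !ext.contains c)).length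
decreasing_by
  obtain ⟨c, hcf, hcnp, hcin⟩ := sweep_changed free ext h
  exact pv_length_filter_lt free (fun a => !ext.contains a)
    (fun a => !(sweep free ext false).1.contains a)
    (by intro a ha
        simp only [Bool.not_eq_true'] at ha ⊢
        rw [Bool.eq_false_iff] at ha ⊢
        exact fun hmem => ha (sweep_subset free ext false a hmem))
    c hcf (by simp [hcnp]) (by simp [hcin])

def freeCells (border : List (Int × Int)) (minx maxx miny maxy : Int) :
    List (Int × Int) :=
  (PySem.List.pyRange minx (maxx + 1)).flatMap (fun x =>
    ((PySem.List.pyRange miny (maxy + 1)).map (fun y => (x, y))).filter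
      (fun c => decide (c ∉ border)))

def get_interior_alt (border : List (Int × Int)) (bounds : Int × Int × Int × Int) :
    List (Int × Int) :=
  match bounds with
  | (minx, maxx, miny, maxy) =>
    let free := freeCells border minx maxx miny maxy
    let ext :=
      if (minx, miny) ∈ free then
        satLoop free ((∅ : Std.HashSet (Int × Int)).insert (minx, miny))
      else ∅
    free.filter (fun c => !ext.contains c)

-- ===== PRECONDITION & SPEC =====
def Spec_get_interior (border : List (Int × Int)) (bounds : Int × Int × Int × Int) (out : List (Int × Int)) : Prop := out = get_interior_alt border bounds
instance (border : List (Int × Int)) (bounds : Int × Int × Int × Int) (out : List (Int × Int)) : Decidable (Spec_get_interior border bounds out) := by unfold Spec_get_interior; infer_instance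

-- ===== CLAIM (what is proved, stated in full; the proofs are below) =====
def Claim_equal_get_interior : Prop := ∀ (border : List (Int × Int)) (bounds : Int × Int × Int × Int), Dom_get_interior border bounds → Spec_get_interior border bounds (get_interior border bounds)

-- ===== LEMMAS AND PROOFS =====

-- free/valid cells of the box, and 4-adjacency
def Valid (border : List (Int × Int)) (minx maxx miny maxy : Int) (c : Int × Int) : Prop :=
  minx ≤ c.1 ∧ c.1 ≤ maxx ∧ miny ≤ c.2 ∧ c.2 ≤ maxy ∧ c ∉ border

def Adj (c d : Int × Int) : Prop :=
  d = (c.1 + 1, c.2) ∨ d = (c.1 - 1, c.2) ∨ d = (c.1, c.2 + 1) ∨ d = (c.1, c.2 - 1)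

-- cells connected to the corner (minx, miny) through valid cells
inductive Reach (border : List (Int × Int)) (minx maxx miny maxy : Int) : Int × Int → Prop
  | start : Valid border minx maxx miny maxy (minx, miny) →
      Reach border minx maxx miny maxy (minx, miny)
  | step {c d : Int × Int} : Reach border minx maxx miny maxy c → Adj c d →
      Valid border minx maxx miny maxy d → Reach border minx maxx miny maxy d

theorem valid_mk {border : List (Int × Int)} {minx maxx miny maxy x y : Int} :
    Valid border minx maxx miny maxy (x, y) ↔
      minx ≤ x ∧ x ≤ maxx ∧ miny ≤ y ∧ y ≤ maxy ∧ (x, y) ∉ border := Iff.rfl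

theorem adj_symm {c d : Int × Int} (h : Adj c d) : Adj d c := by
  rcases h with rfl | rfl | rfl | rfl
  · exact Or.inr (Or.inl (by simp))
  · exact Or.inl (by simp)
  · exact Or.inr (Or.inr (Or.inr (by simp)))
  · exact Or.inr (Or.inr (Or.inl (by simp)))

theorem reach_start {border : List (Int × Int)} {minx maxx miny maxy : Int} {c : Int × Int}
    (h : Reach border minx maxx miny maxy c) : Valid border minx maxx miny maxy (minx, miny) := by
  induction h with
  | start hv => exact hv
  | step _ _ _ ih => exact ih

theorem contains_insert_self {s : Std.HashSet (Int × Int)} {c : Int × Int} :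
    (s.insert c).contains c = true := by
  simp [Std.HashSet.contains_insert]

theorem contains_insert_iff {s : Std.HashSet (Int × Int)} {c d : Int × Int} :
    (s.insert c).contains d = true ↔ s.contains d = true ∨ d = c := by
  rw [Std.HashSet.contains_insert, Bool.or_eq_true, beq_iff_eq]
  exact or_comm.trans (or_congr_right eq_comm)

theorem nodup_bboxCells (minx maxx miny maxy : Int) : (bboxCells minx maxx miny maxy).Nodup := by
  rw [bboxCells, List.nodup_flatMap]
  refine ⟨fun x _ => ?_, ?_⟩
  · exact (PySem.List.nodup_pyRange_one miny (maxy + 1)).map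
      (fun a b hab => by simpa [Prod.ext_iff] using hab)
  · refine (PySem.List.nodup_pyRange_one minx (maxx + 1)).imp ?_
    intro a b hab z hza hzb
    simp only [List.mem_map] at hza hzb
    obtain ⟨y1, _, rfl⟩ := hza
    obtain ⟨y2, _, h2⟩ := hzb
    exact hab ((Prod.mk.injEq _ _ _ _ ▸ h2 : b = a ∧ y2 = y1).1.symm)

theorem mem_freeCells {border : List (Int × Int)} {minx maxx miny maxy : Int} {c : Int × Int} :
    c ∈ freeCells border minx maxx miny maxy ↔ Valid border minx maxx miny maxy c := by
  simp only [freeCells, Valid, List.mem_flatMap, List.mem_filter, List.mem_map,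
    PySem.List.mem_pyRange_one, decide_eq_true_eq]
  constructor
  · rintro ⟨x, hx, ⟨y, hy, rfl⟩, hb⟩
    simp only at *
    exact ⟨by omega, by omega, by omega, by omega, hb⟩
  · rintro ⟨h1, h2, h3, h4, hb⟩
    exact ⟨c.1, by omega, ⟨c.2, by omega, rfl⟩, hb⟩

-- ===== A-side: the flood fill marks exactly the reachable cells =====

theorem flood_sound (border : List (Int × Int)) (minx maxx miny maxy : Int) :
    ∀ (ext : Std.HashSet (Int × Int)) (queue : List (Int × Int)),
      (∀ e, ext.contains e = true → Reach border minx maxx miny maxy e) →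
      (∀ q ∈ queue, Valid border minx maxx miny maxy q → Reach border minx maxx miny maxy q) →
      ∀ e, (floodLoop border minx maxx miny maxy ext queue).contains e = true →
        Reach border minx maxx miny maxy e := by
  intro ext queue
  induction ext, queue using floodLoop.induct border minx maxx miny maxy with
  | case1 ext =>
    intro hext _
    rw [floodLoop]
    exact hext
  | case2 ext x y rest hguard ih =>
    intro hext hq
    rw [floodLoop, if_pos hguard]
    exact ih hext (fun q hq' hv => hq q (List.mem_cons_of_mem _ hq') hv)
  | case3 ext x y rest hguard hmem ih =>
    intro hext hq
    rw [floodLoop, if_neg hguard, if_pos hmem]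
    exact ih hext (fun q hq' hv => hq q (List.mem_cons_of_mem _ hq') hv)
  | case4 ext x y rest hguard hmem ih =>
    intro hext hq
    rw [floodLoop, if_neg hguard, if_neg hmem]
    push_neg at hguard
    have hR : Reach border minx maxx miny maxy (x, y) :=
      hq (x, y) List.mem_cons_self
        (valid_mk.mpr ⟨by omega, by omega, by omega, by omega, fun hb => hmem (Or.inr hb)⟩)
    refine ih ?_ ?_
    · intro e he
      rcases contains_insert_iff.mp he with he' | rfl
      · exact hext e he'
      · exact hR
    · intro q hq' hv
      rcases List.mem_cons.mp hq' with rfl | hq' <;>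
        [exact Reach.step hR (Or.inr (Or.inr (Or.inr rfl))) hv; skip]
      rcases List.mem_cons.mp hq' with rfl | hq' <;>
        [exact Reach.step hR (Or.inr (Or.inr (Or.inl rfl))) hv; skip]
      rcases List.mem_cons.mp hq' with rfl | hq' <;>
        [exact Reach.step hR (Or.inr (Or.inl rfl)) hv; skip]
      rcases List.mem_cons.mp hq' with rfl | hq' <;>
        [exact Reach.step hR (Or.inl rfl) hv; skip]
      exact hq q (List.mem_cons_of_mem _ hq') hv

theorem flood_complete (border : List (Int × Int)) (minx maxx miny maxy : Int) :
    ∀ (ext : Std.HashSet (Int × Int)) (queue : List (Int × Int)),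
      (∀ e, ext.contains e = true → ∀ d, Adj e d → Valid border minx maxx miny maxy d →
        ext.contains d = true ∨ d ∈ queue) →
      (Valid border minx maxx miny maxy (minx, miny) →
        ext.contains (minx, miny) = true ∨ (minx, miny) ∈ queue) →
      (Valid border minx maxx miny maxy (minx, miny) →
        (floodLoop border minx maxx miny maxy ext queue).contains (minx, miny) = true) ∧
      (∀ e, (floodLoop border minx maxx miny maxy ext queue).contains e = true → ∀ d, Adj e d →
        Valid border minx maxx miny maxy d →
        (floodLoop border minx maxx miny maxy ext queue).contains d = true) := by
  intro ext queue
  induction ext, queue using floodLoop.induct border minx maxx miny maxy with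
  | case1 ext =>
    intro hInv hStart
    rw [floodLoop]
    refine ⟨fun hv => ?_, fun e he d hadj hvd => ?_⟩
    · rcases hStart hv with h | h
      · exact h
      · simp at h
    · rcases hInv e he d hadj hvd with h | h
      · exact h
      · simp at h
  | case2 ext x y rest hguard ih =>
    intro hInv hStart
    rw [floodLoop, if_pos hguard]
    refine ih ?_ ?_
    · intro e he d hadj hvd
      rcases hInv e he d hadj hvd with h | h
      · exact Or.inl h
      · rcases List.mem_cons.mp h with rfl | h'
        · obtain ⟨h1, h2, h3, h4, _⟩ := valid_mk.mp hvd
          omega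
        · exact Or.inr h'
    · intro hv
      rcases hStart hv with h | h
      · exact Or.inl h
      · rcases List.mem_cons.mp h with heq | h'
        · obtain ⟨hx, hy⟩ := Prod.mk.injEq _ _ _ _ ▸ heq
          obtain ⟨h1, h2, h3, h4, _⟩ := valid_mk.mp hv
          omega
        · exact Or.inr h'
  | case3 ext x y rest hguard hmem ih =>
    intro hInv hStart
    rw [floodLoop, if_neg hguard, if_pos hmem]
    refine ih ?_ ?_
    · intro e he d hadj hvd
      rcases hInv e he d hadj hvd with h | h
      · exact Or.inl h
      · rcases List.mem_cons.mp h with rfl | h'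
        · rcases hmem with hm | hm
          · exact Or.inl hm
          · exact absurd hm (valid_mk.mp hvd).2.2.2.2
        · exact Or.inr h'
    · intro hv
      rcases hStart hv with h | h
      · exact Or.inl h
      · rcases List.mem_cons.mp h with heq | h'
        · rcases hmem with hm | hm
          · exact Or.inl (heq ▸ hm)
          · exact absurd (heq ▸ hm) (valid_mk.mp hv).2.2.2.2
        · exact Or.inr h'
  | case4 ext x y rest hguard hmem ih =>
    intro hInv hStart
    rw [floodLoop, if_neg hguard, if_neg hmem]
    refine ih ?_ ?_
    · intro e he d hadj hvd
      rcases contains_insert_iff.mp he with he' | rfl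
      · rcases hInv e he' d hadj hvd with h | h
        · exact Or.inl (contains_insert_iff.mpr (Or.inl h))
        · rcases List.mem_cons.mp h with rfl | h'
          · exact Or.inl (contains_insert_iff.mpr (Or.inr rfl))
          · exact Or.inr (by simp [h'])
      · refine Or.inr ?_
        rcases hadj with rfl | rfl | rfl | rfl <;> simp
    · intro hv
      rcases hStart hv with h | h
      · exact Or.inl (contains_insert_iff.mpr (Or.inl h))
      · rcases List.mem_cons.mp h with heq | h'
        · exact Or.inl (contains_insert_iff.mpr (Or.inr heq))
        · exact Or.inr (by simp [h'])

theorem mem_extA (border : List (Int × Int)) (minx maxx miny maxy : Int) (c : Int × Int) :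
    (flood_fill_exterior border (minx, maxx, miny, maxy)).contains c = true ↔
      Reach border minx maxx miny maxy c := by
  have hff : flood_fill_exterior border (minx, maxx, miny, maxy)
      = floodLoop border minx maxx miny maxy ∅ [(minx, miny)] := rfl
  rw [hff]
  constructor
  · intro hc
    refine flood_sound border minx maxx miny maxy ∅ [(minx, miny)]
      (fun e he => ?_) (fun q hq hv => ?_) c hc
    · simp at he
    · rcases List.mem_cons.mp hq with rfl | h
      · exact Reach.start hv
      · simp at h
  · intro hr
    have h := flood_complete border minx maxx miny maxy ∅ [(minx, miny)]
      (fun e he => by simp at he)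
      (fun _ => Or.inr List.mem_cons_self)
    induction hr with
    | start hv => exact h.1 hv
    | step hc hadj hvd ih => exact h.2 _ ih _ hadj hvd

-- ===== B-side: the saturation marks exactly the reachable cells =====

-- once `changed` is set it stays set
theorem sweep_snd_true (free : List (Int × Int)) (ext : Std.HashSet (Int × Int)) :
    (sweep free ext true).2 = true := by
  induction free generalizing ext with
  | nil => rfl
  | cons hd tl ih =>
    obtain ⟨x, y⟩ := hd
    rw [sweep]
    split
    · exact ih _
    · exact ih _

theorem sweep_false (free : List (Int × Int)) (ext : Std.HashSet (Int × Int))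
    (h : (sweep free ext false).2 = false) :
    (sweep free ext false).1 = ext ∧
      ∀ c ∈ free, ext.contains c = false →
        ¬(ext.contains (c.1 + 1, c.2) = true ∨ ext.contains (c.1 - 1, c.2) = true ∨
          ext.contains (c.1, c.2 + 1) = true ∨ ext.contains (c.1, c.2 - 1) = true) := by
  induction free generalizing ext with
  | nil => exact ⟨rfl, by simp⟩
  | cons hd tl ih =>
    obtain ⟨a, b⟩ := hd
    rw [sweep] at h ⊢
    by_cases hcond : ¬ext.contains (a, b) ∧ (ext.contains (a + 1, b) ∨ ext.contains (a - 1, b) ∨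
        ext.contains (a, b + 1) ∨ ext.contains (a, b - 1))
    · rw [if_pos hcond] at h
      rw [sweep_snd_true] at h
      cases h
    · rw [if_neg hcond] at h ⊢
      obtain ⟨heq, hcl⟩ := ih _ h
      refine ⟨heq, ?_⟩
      intro c hc hcn
      rcases List.mem_cons.mp hc with rfl | hc'
      · intro hnbrs
        exact hcond ⟨by simp [hcn], by simpa using hnbrs⟩
      · exact hcl c hc' hcn

theorem sweep_sound (border : List (Int × Int)) (minx maxx miny maxy : Int) :
    ∀ (free : List (Int × Int)) (ext : Std.HashSet (Int × Int)) (ch : Bool),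
      (∀ e, ext.contains e = true → Reach border minx maxx miny maxy e) →
      (∀ c ∈ free, Valid border minx maxx miny maxy c) →
      ∀ x, (sweep free ext ch).1.contains x = true → Reach border minx maxx miny maxy x := by
  intro free
  induction free with
  | nil => exact fun ext ch hext _ x hx => hext x hx
  | cons hd tl ih =>
    obtain ⟨a, b⟩ := hd
    intro ext ch hext hfree x hx
    rw [sweep] at hx
    split at hx
    · rename_i hcond
      refine ih _ _ ?_ (fun c hc => hfree c (List.mem_cons_of_mem _ hc)) x hx
      intro e he
      rcases contains_insert_iff.mp he with he' | rfl
      · exact hext e he'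
      · have hV : Valid border minx maxx miny maxy (a, b) := hfree (a, b) List.mem_cons_self
        rcases hcond.2 with hn | hn | hn | hn
        · exact Reach.step (hext _ hn) (adj_symm (Or.inl rfl)) hV
        · exact Reach.step (hext _ hn) (adj_symm (Or.inr (Or.inl rfl))) hV
        · exact Reach.step (hext _ hn) (adj_symm (Or.inr (Or.inr (Or.inl rfl)))) hV
        · exact Reach.step (hext _ hn) (adj_symm (Or.inr (Or.inr (Or.inr rfl)))) hV
    · exact ih _ _ hext (fun c hc => hfree c (List.mem_cons_of_mem _ hc)) x hx

theorem satLoop_subset (free : List (Int × Int)) (ext : Std.HashSet (Int × Int))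
    (c : Int × Int) (hc : ext.contains c = true) : (satLoop free ext).contains c = true := by
  induction ext using satLoop.induct free with
  | case1 ext h ih =>
    rw [satLoop, dif_pos h]
    exact ih (sweep_subset free ext false c hc)
  | case2 ext h =>
    rw [satLoop, dif_neg h]
    exact hc

theorem satLoop_sound (border : List (Int × Int)) (minx maxx miny maxy : Int)
    (free : List (Int × Int)) (ext : Std.HashSet (Int × Int))
    (hfree : ∀ c ∈ free, Valid border minx maxx miny maxy c)
    (hext : ∀ e, ext.contains e = true → Reach border minx maxx miny maxy e) :
    ∀ x, (satLoop free ext).contains x = true → Reach border minx maxx miny maxy x := by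
  revert hext
  induction ext using satLoop.induct free with
  | case1 ext h ih =>
    intro hext
    rw [satLoop, dif_pos h]
    exact ih (sweep_sound border minx maxx miny maxy free ext false hext hfree)
  | case2 ext h =>
    intro hext
    rw [satLoop, dif_neg h]
    exact hext

theorem satLoop_closed (free : List (Int × Int)) (ext : Std.HashSet (Int × Int)) :
    ∀ c ∈ free, (satLoop free ext).contains c = false →
      ¬((satLoop free ext).contains (c.1 + 1, c.2) = true ∨
        (satLoop free ext).contains (c.1 - 1, c.2) = true ∨
        (satLoop free ext).contains (c.1, c.2 + 1) = true ∨
        (satLoop free ext).contains (c.1, c.2 - 1) = true) := by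
  induction ext using satLoop.induct free with
  | case1 ext h ih =>
    rw [satLoop, dif_pos h]
    exact ih
  | case2 ext h =>
    rw [satLoop, dif_neg h]
    exact (sweep_false free ext (Bool.eq_false_iff.mpr h)).2

theorem mem_extB (border : List (Int × Int)) (minx maxx miny maxy : Int) (c : Int × Int) :
    (if (minx, miny) ∈ freeCells border minx maxx miny maxy then
        satLoop (freeCells border minx maxx miny maxy)
          ((∅ : Std.HashSet (Int × Int)).insert (minx, miny))
      else ∅).contains c = true ↔
      Reach border minx maxx miny maxy c := by
  by_cases hf : (minx, miny) ∈ freeCells border minx maxx miny maxy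
  · rw [if_pos hf]
    have hvs : Valid border minx maxx miny maxy (minx, miny) := mem_freeCells.mp hf
    constructor
    · intro hc
      refine satLoop_sound border minx maxx miny maxy _ _
        (fun d hd => mem_freeCells.mp hd) (fun e he => ?_) c hc
      have : e = (minx, miny) := by
        rcases contains_insert_iff.mp he with h | h
        · simp at h
        · exact h
      exact this ▸ Reach.start hvs
    · intro hr
      induction hr with
      | start hv => exact satLoop_subset _ _ _ contains_insert_self
      | step hc hadj hvd ih =>
        rename_i c' d'
        by_contra hd
        have hcl := satLoop_closed (freeCells border minx maxx miny maxy)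
          ((∅ : Std.HashSet (Int × Int)).insert (minx, miny)) d' (mem_freeCells.mpr hvd)
          (Bool.not_eq_true _ ▸ hd)
        refine hcl ?_
        rcases hadj with rfl | rfl | rfl | rfl
        · exact Or.inr (Or.inl (by simpa using ih))
        · exact Or.inl (by simpa using ih)
        · exact Or.inr (Or.inr (Or.inr (by simpa using ih)))
        · exact Or.inr (Or.inr (Or.inl (by simpa using ih)))
  · rw [if_neg hf]
    constructor
    · intro hc
      simp at hc
    · intro hr
      exact absurd (mem_freeCells.mpr (reach_start hr)) hf

-- ===== assembly =====

theorem foldl_add_filter (p : Int × Int → Prop) [DecidablePred p] :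
    ∀ (L : List (Int × Int)) (s : PySem.Set (Int × Int)), L.Nodup → (∀ c ∈ L, c ∉ s) →
      (L.foldl (fun acc c => if p c then PySem.Set.add acc c else acc) s)
        = s ++ L.filter (fun c => decide (p c)) := by
  intro L
  induction L with
  | nil => intro s _ _; simp
  | cons c t ih =>
    intro s hnd hs
    have hc : c ∉ s := hs c List.mem_cons_self
    by_cases hp : p c
    · have hadd : PySem.Set.add s c = s ++ [c] := by
        simp [PySem.Set.add, PySem.Set.contains, hc]
      rw [List.foldl_cons, if_pos hp, hadd,
        ih (s ++ [c]) hnd.of_cons (fun d hd hmem => by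
          rcases List.mem_append.mp hmem with h | h
          · exact hs d (List.mem_cons_of_mem _ hd) h
          · exact (List.rel_of_pairwise_cons hnd hd) ((by simpa using h : d = c).symm))]
      simp [hp, List.append_assoc]
    · rw [List.foldl_cons, if_neg hp, ih s hnd.of_cons (fun d hd => hs d (List.mem_cons_of_mem _ hd))]
      simp [hp]

theorem get_interior_eq (border : List (Int × Int)) (minx maxx miny maxy : Int) :
    get_interior border (minx, maxx, miny, maxy)
      = (bboxCells minx maxx miny maxy).filter
          (fun c => decide (c ∉ border ∧
            ¬(flood_fill_exterior border (minx, maxx, miny, maxy)).contains c)) := by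
  have h0 : get_interior border (minx, maxx, miny, maxy)
      = (PySem.List.pyRange minx (maxx + 1)).foldl (fun acc x =>
          (PySem.List.pyRange miny (maxy + 1)).foldl (fun acc y =>
            if (x, y) ∉ border ∧ ¬(flood_fill_exterior border (minx, maxx, miny, maxy)).contains (x, y)
            then PySem.Set.add acc (x, y) else acc) acc)
          (PySem.Set.ofList []) := rfl
  have h1 : (bboxCells minx maxx miny maxy).foldl
      (fun acc c => if c ∉ border ∧ ¬(flood_fill_exterior border (minx, maxx, miny, maxy)).contains c
        then PySem.Set.add acc c else acc) (PySem.Set.ofList [])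
      = (PySem.List.pyRange minx (maxx + 1)).foldl (fun acc x =>
          (PySem.List.pyRange miny (maxy + 1)).foldl (fun acc y =>
            if (x, y) ∉ border ∧ ¬(flood_fill_exterior border (minx, maxx, miny, maxy)).contains (x, y)
            then PySem.Set.add acc (x, y) else acc) acc)
          (PySem.Set.ofList []) := by
    rw [bboxCells, List.foldl_flatMap]
    simp only [List.foldl_map]
  have h2 := foldl_add_filter
    (fun c => c ∉ border ∧ ¬(flood_fill_exterior border (minx, maxx, miny, maxy)).contains c)
    (bboxCells minx maxx miny maxy) (PySem.Set.ofList [])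
    (nodup_bboxCells minx maxx miny maxy)
    (fun c _ hmem => by simp [PySem.Set.ofList] at hmem)
  rw [h0, ← h1, h2]
  simp [PySem.Set.ofList]

theorem freeCells_eq (border : List (Int × Int)) (minx maxx miny maxy : Int) :
    freeCells border minx maxx miny maxy
      = (bboxCells minx maxx miny maxy).filter (fun c => decide (c ∉ border)) := by
  rw [freeCells, bboxCells, List.filter_flatMap]

-- ===== VERDICT (by name: the statement is the Claim_ definition above) =====
theorem get_interior_spec : Claim_equal_get_interior := by
  intro border bounds _
  obtain ⟨minx, maxx, miny, maxy⟩ := bounds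
  unfold Spec_get_interior
  have hB : get_interior_alt border (minx, maxx, miny, maxy)
      = (freeCells border minx maxx miny maxy).filter
          (fun c => !(if (minx, miny) ∈ freeCells border minx maxx miny maxy then
              satLoop (freeCells border minx maxx miny maxy)
                ((∅ : Std.HashSet (Int × Int)).insert (minx, miny))
            else ∅).contains c) := rfl
  rw [get_interior_eq, hB]
  have hA2 : (bboxCells minx maxx miny maxy).filter
        (fun c => decide (c ∉ border ∧
          ¬(flood_fill_exterior border (minx, maxx, miny, maxy)).contains c))
      = (freeCells border minx maxx miny maxy).filter
          (fun c => !(flood_fill_exterior border (minx, maxx, miny, maxy)).contains c) := by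
    rw [freeCells_eq, List.filter_filter]
    refine List.filter_congr (fun c _ => ?_)
    by_cases hb : c ∈ border <;>
      by_cases he : (flood_fill_exterior border (minx, maxx, miny, maxy)).contains c = true <;>
      simp [hb, he]
  rw [hA2]
  refine List.filter_congr (fun c _ => ?_)
  have hiff := (mem_extA border minx maxx miny maxy c).trans
    (mem_extB border minx maxx miny maxy c).symm
  by_cases he : (flood_fill_exterior border (minx, maxx, miny, maxy)).contains c = true
  · simp [he, hiff.mp he]
  · have h2 : (if (minx, miny) ∈ freeCells border minx maxx miny maxy then
        satLoop (freeCells border minx maxx miny maxy)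
          ((∅ : Std.HashSet (Int × Int)).insert (minx, miny))
      else ∅).contains c = false := by
      rw [Bool.eq_false_iff]
      exact fun h => he (hiff.mpr h)
    simp [Bool.eq_false_iff.mpr he, h2]
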